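-- pv_equiv track=rewrite | github.com/ThalesGroup/agilab | tools/generate_vscode_tasks.py | expand_repo_macros
-- ===== SOURCE A (Python) =====
-- def expand_repo_macros(text: str) -> str:
--     replacements = {
--         "$ProjectFileDir$": "${workspaceFolder}",
--         "$PROJECT_DIR$": "${workspaceFolder}",
--         "$USER_HOME$": "${env:HOME}",
--         "$MODULE_DIR$": "${workspaceFolder}/.idea/modules",
--     }
--     for key, value in replacements.items():
--         text = text.replace(key, value)
--     return text
-- ===== SOURCE B (Python) =====
-- def expand_repo_macros(text: str) -> str:
--     macro_table = (
--         ("$ProjectFileDir$", "${workspaceFolder}"),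
--         ("$PROJECT_DIR$", "${workspaceFolder}"),
--         ("$USER_HOME$", "${env:HOME}"),
--         ("$MODULE_DIR$", "${workspaceFolder}/.idea/modules"),
--     )
--     pieces = []
--     i = 0
--     n = len(text)
--     while i < n:
--         for macro, expansion in macro_table:
--             if text.startswith(macro, i):
--                 pieces.append(expansion)
--                 i += len(macro)
--                 break
--         else:
--             pieces.append(text[i])
--             i += 1
--     return "".join(pieces)
-- ===== Notes on version B (the rewrite author's own statement) =====
-- stated objective: alternative
-- what changed: Replaces A's four sequential whole-string replace passes with a single left-to-right scan that emits each macro's expansion (or the current character) in one pass; CPython's C-level str.replace keeps A faster in wall-clock terms.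
import Mathlib
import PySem

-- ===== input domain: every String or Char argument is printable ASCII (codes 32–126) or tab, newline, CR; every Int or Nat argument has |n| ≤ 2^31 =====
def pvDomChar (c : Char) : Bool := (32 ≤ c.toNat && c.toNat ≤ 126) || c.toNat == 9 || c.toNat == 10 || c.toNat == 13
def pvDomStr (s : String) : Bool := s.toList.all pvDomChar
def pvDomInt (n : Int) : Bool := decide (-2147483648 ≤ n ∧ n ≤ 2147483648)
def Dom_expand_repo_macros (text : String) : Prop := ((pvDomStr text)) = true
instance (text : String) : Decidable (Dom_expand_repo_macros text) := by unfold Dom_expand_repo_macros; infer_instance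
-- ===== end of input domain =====

-- B replaces A's four sequential whole-string replace passes by a single left-to-right scan;
-- the equivalence is claimed on texts where no macro key (minus its final dollar) is immediately
-- followed by an earlier-listed macro key (Pre_ below); A mutates nothing, return value only.

-- ===== PORT A =====
-- literal port of A: a dict of replacements, then one str.replace pass per item, in order
def expand_repo_macros (text : String) : String :=
  let replacements : List (String × String) :=
    [("$ProjectFileDir$", "${workspaceFolder}"),
     ("$PROJECT_DIR$", "${workspaceFolder}"),
     ("$USER_HOME$", "${env:HOME}"),
     ("$MODULE_DIR$", "${workspaceFolder}/.idea/modules")]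
  replacements.foldl (fun t kv => PySem.Str.replace t kv.1 kv.2) text

-- ===== PORT B =====
-- the replacements dict of Source B, as (key, value) char lists in insertion order
def pvReps : List (List Char × List Char) :=
  [("$ProjectFileDir$".toList, "${workspaceFolder}".toList),
   ("$PROJECT_DIR$".toList, "${workspaceFolder}".toList),
   ("$USER_HOME$".toList, "${env:HOME}".toList),
   ("$MODULE_DIR$".toList, "${workspaceFolder}/.idea/modules".toList)]

-- termination fact for the scan: every key is nonempty
theorem pvReps_key_pos : ∀ p ∈ pvReps, 1 ≤ p.1.length := by decide

-- Source B's while loop: at each position try the keys in dict order (find?); on a match emit the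
-- value and advance by the key's length, otherwise emit the character and advance by one
def scanB : List Char → List Char
  | [] => []
  | c :: t =>
    match h : pvReps.find? (fun p => p.1.isPrefixOf (c :: t)) with
    | some p => p.2 ++ scanB ((c :: t).drop p.1.length)
    | none => c :: scanB t
termination_by l => l.length
decreasing_by
  · have := pvReps_key_pos _ (List.mem_of_find?_eq_some h)
    simp only [List.length_drop, List.length_cons]
    omega
  · simp

def expand_repo_macros_alt (text : String) : String := String.ofList (scanB text.toList)

-- ===== PRECONDITION & SPEC =====
-- Pre_ excludes texts in which a macro key minus its final dollar sign is immediately followed by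
-- an earlier-listed macro key: there A's sequential passes let one replacement's leading dollar
-- complete the other macro, an accident of pass order a single scan has no reason to reproduce.
def Pre_expand_repo_macros (text : String) : Prop :=
  ¬ "$PROJECT_DIR$ProjectFileDir$".toList <:+: text.toList ∧
  ¬ "$USER_HOME$ProjectFileDir$".toList <:+: text.toList ∧
  ¬ "$USER_HOME$PROJECT_DIR$".toList <:+: text.toList ∧
  ¬ "$MODULE_DIR$ProjectFileDir$".toList <:+: text.toList ∧
  ¬ "$MODULE_DIR$PROJECT_DIR$".toList <:+: text.toList ∧
  ¬ "$MODULE_DIR$USER_HOME$".toList <:+: text.toList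
instance (text : String) : Decidable (Pre_expand_repo_macros text) := by
  unfold Pre_expand_repo_macros; infer_instance

def pvWitness_expand_repo_macros : String := "$PROJECT_DIR$/src on $USER_HOME$"

def Spec_expand_repo_macros (text : String) (out : String) : Prop := out = expand_repo_macros_alt text
instance (text : String) (out : String) : Decidable (Spec_expand_repo_macros text out) := by
  unfold Spec_expand_repo_macros; infer_instance

-- ===== CLAIM (what is proved, stated in full; the proofs are below) =====
def Claim_equal_expand_repo_macros : Prop := ∀ (text : String), Dom_expand_repo_macros text → Pre_expand_repo_macros text → Spec_expand_repo_macros text (expand_repo_macros text)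

-- ===== LEMMAS AND PROOFS =====

-- concrete char-list forms of the keys, values and excluded overlap patterns
def cK1 : List Char := ['$','P','r','o','j','e','c','t','F','i','l','e','D','i','r','$']
def cK2 : List Char := ['$','P','R','O','J','E','C','T','_','D','I','R','$']
def cK3 : List Char := ['$','U','S','E','R','_','H','O','M','E','$']
def cK4 : List Char := ['$','M','O','D','U','L','E','_','D','I','R','$']
def cV1 : List Char := ['$','{','w','o','r','k','s','p','a','c','e','F','o','l','d','e','r','}']
def cV3 : List Char := ['$','{','e','n','v',':','H','O','M','E','}']
def cV4 : List Char := ['$','{','w','o','r','k','s','p','a','c','e','F','o','l','d','e','r','}','/','.','i','d','e','a','/','m','o','d','u','l','e','s']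

set_option maxRecDepth 8192 in
theorem eK1 : "$ProjectFileDir$".toList = cK1 := by rfl
set_option maxRecDepth 8192 in
theorem eK2 : "$PROJECT_DIR$".toList = cK2 := by rfl
set_option maxRecDepth 8192 in
theorem eK3 : "$USER_HOME$".toList = cK3 := by rfl
set_option maxRecDepth 8192 in
theorem eK4 : "$MODULE_DIR$".toList = cK4 := by rfl
set_option maxRecDepth 8192 in
theorem eV1 : "${workspaceFolder}".toList = cV1 := by rfl
set_option maxRecDepth 8192 in
theorem eV3 : "${env:HOME}".toList = cV3 := by rfl
set_option maxRecDepth 8192 in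
theorem eV4 : "${workspaceFolder}/.idea/modules".toList = cV4 := by rfl
set_option maxRecDepth 8192 in
theorem eB21 : "$PROJECT_DIR$ProjectFileDir$".toList = cK2.dropLast ++ cK1 := by rfl
set_option maxRecDepth 8192 in
theorem eB31 : "$USER_HOME$ProjectFileDir$".toList = cK3.dropLast ++ cK1 := by rfl
set_option maxRecDepth 8192 in
theorem eB32 : "$USER_HOME$PROJECT_DIR$".toList = cK3.dropLast ++ cK2 := by rfl
set_option maxRecDepth 8192 in
theorem eB41 : "$MODULE_DIR$ProjectFileDir$".toList = cK4.dropLast ++ cK1 := by rfl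
set_option maxRecDepth 8192 in
theorem eB42 : "$MODULE_DIR$PROJECT_DIR$".toList = cK4.dropLast ++ cK2 := by rfl
set_option maxRecDepth 8192 in
theorem eB43 : "$MODULE_DIR$USER_HOME$".toList = cK4.dropLast ++ cK3 := by rfl
set_option maxRecDepth 8192 in
theorem eReps : pvReps = [(cK1, cV1), (cK2, cV1), (cK3, cV3), (cK4, cV4)] := by rfl

def genScan (ps : List (List Char × List Char)) : List Char → List Char
  | [] => []
  | c :: t =>
    match ps.find? (fun p => p.1.isPrefixOf (c :: t)) with
    | some p => p.2 ++ genScan ps ((c :: t).drop (max p.1.length 1))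
    | none => c :: genScan ps t
termination_by l => l.length
decreasing_by
  · simp only [List.length_drop, List.length_cons]; omega
  · simp
theorem genScan_nil (ps : List (List Char × List Char)) : genScan ps [] = [] := by
  simp [genScan]
theorem genScan_cons_some (ps : List (List Char × List Char)) (c : Char) (t : List Char)
    (p : List Char × List Char)
    (h : ps.find? (fun p => p.1.isPrefixOf (c :: t)) = some p) (hp : p.1 ≠ []) :
    genScan ps (c :: t) = p.2 ++ genScan ps ((c :: t).drop p.1.length) := by
  have hm : max p.1.length 1 = p.1.length := by
    have := List.length_pos_iff.mpr hp; omega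
  rw [genScan, h]; simp only [hm]
theorem genScan_cons_none (ps : List (List Char × List Char)) (c : Char) (t : List Char)
    (h : ps.find? (fun p => p.1.isPrefixOf (c :: t)) = none) :
    genScan ps (c :: t) = c :: genScan ps t := by
  rw [genScan, h]

theorem genScan_barrier (ps : List (List Char × List Char)) :
    ∀ (u x : List Char),
    (∀ j < u.length, ∀ p ∈ ps, ¬ p.1 <+: (u.drop j ++ x)) →
    genScan ps (u ++ x) = u ++ genScan ps x
  | [], x, _ => by simp
  | a :: u', x, h => by
    have hfind : ps.find? (fun p => p.1.isPrefixOf (a :: (u' ++ x))) = none := by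
      rw [List.find?_eq_none]
      intro p hp
      have := h 0 (by simp) p hp
      simpa [List.isPrefixOf_iff_prefix] using this
    rw [List.cons_append, genScan_cons_none _ _ _ hfind,
        genScan_barrier ps u' x (fun j hj p hp => h (j+1) (by simpa using Nat.succ_lt_succ hj) p hp)]
    simp


theorem prefix_head {c : Char} {w y : List Char} (h : (c :: w) <+: y) : y.head? = some c := by
  obtain ⟨t', rfl⟩ := h; simp

theorem prefix_glue {a b t : List Char} (ha : a <+: t) (hb : b <+: t.drop a.length) :
    (a ++ b) <+: t := by
  obtain ⟨t', rfl⟩ := ha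
  simp only [List.drop_left] at hb
  exact (List.prefix_append_right_inj a).mpr hb

theorem genScan_refl (ps : List (List Char × List Char))
    (hv : ∀ p ∈ ps, ∃ vt, p.2 = '$' :: vt)
    (hk : ∀ p ∈ ps, p.1 ≠ []) :
    ∀ (n : Nat) (x w : List Char), x.length ≤ n → w ≠ [] → w.getLast? = some '$' →
    (∀ a ∈ w.dropLast, a ≠ '$') →
    w <+: genScan ps x →
    w <+: x ∨ ∃ p ∈ ps, w.dropLast <+: x ∧ p.1 <+: x.drop (w.length - 1) := by
  intro n
  induction n with
  | zero =>
    intro x w hx hw _ _ hpre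
    have : x = [] := by cases x <;> simp_all
    subst this
    rw [genScan_nil] at hpre
    exact absurd (List.prefix_nil.mp hpre) hw
  | succ n ih =>
    intro x w hx hw hlast hint hpre
    cases x with
    | nil =>
      rw [genScan_nil] at hpre
      exact absurd (List.prefix_nil.mp hpre) hw
    | cons c t =>
      cases hfind : ps.find? (fun p => p.1.isPrefixOf (c :: t)) with
      | some p =>
        have hpmem := List.mem_of_find?_eq_some hfind
        obtain ⟨vt, hvt⟩ := hv p hpmem
        rw [genScan_cons_some _ _ _ _ hfind (hk p hpmem), hvt] at hpre
        cases w with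
        | nil => exact absurd rfl hw
        | cons w0 w' =>
          have hw0 : w0 = '$' := by
            have := prefix_head hpre
            simpa using this.symm
          cases w' with
          | nil =>
            refine Or.inr ⟨p, hpmem, by simp, ?_⟩
            simp only [List.length_cons, List.length_nil]
            have := List.find?_some hfind
            simpa [List.isPrefixOf_iff_prefix] using this
          | cons w1 w'' =>
            exfalso
            have : w0 ∈ (w0 :: w1 :: w'').dropLast := by simp
            exact hint w0 this hw0
      | none =>
        rw [genScan_cons_none _ _ _ hfind] at hpre
        cases w with
        | nil => exact absurd rfl hw
        | cons w0 w' =>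
          have hw0 : w0 = c := by
            have := prefix_head hpre; simpa using this.symm
          subst hw0
          cases hw' : w' with
          | nil =>
            left
            exact ⟨t, by simp⟩
          | cons w1 w'' =>
            subst hw'
            have hpre' : (w1 :: w'') <+: genScan ps t := by
              obtain ⟨t', ht'⟩ := hpre
              exact ⟨t', by simpa using ht'⟩
            have hres := ih t (w1 :: w'') (by simp at hx ⊢; omega) (by simp)
              (by simpa using hlast) (fun a ha => hint a (by simp [ha])) hpre'
            rcases hres with h1 | ⟨p, hpmem, h2, h3⟩
            · left
              obtain ⟨t', rfl⟩ := h1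
              exact ⟨t', by simp⟩
            · right
              refine ⟨p, hpmem, ?_, ?_⟩
              · obtain ⟨t', ht'⟩ := h2
                exact ⟨t', by simp [ht']⟩
              · simpa using h3

theorem genScan_step (ps : List (List Char × List Char)) (k v : List Char)
    (k2 : Char) (ktail : List Char)
    (hk : k = '$' :: k2 :: ktail)
    (hklast : k.getLast? = some '$')
    (hkint : ∀ a ∈ k.dropLast.drop 1, a ≠ '$')
    (hpsk : ∀ p ∈ ps, ∃ kt, p.1 = '$' :: kt)
    (hpsv : ∀ p ∈ ps, ∃ vt, p.2 = '$' :: vt ∧ vt ≠ [] ∧ vt.head? ≠ some k2 ∧ ∀ a ∈ vt, a ≠ '$') :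
    ∀ (n : Nat) (l : List Char), l.length ≤ n →
    (∀ p ∈ ps, ¬ (k.dropLast ++ p.1) <:+: l) →
    genScan [(k, v)] (genScan ps l) = genScan (ps ++ [(k, v)]) l := by
  have hknil : k ≠ [] := by simp [hk]
  have hpsnil : ∀ p ∈ ps, p.1 ≠ [] := by
    intro p hp; obtain ⟨kt, hkt⟩ := hpsk p hp; simp [hkt]
  intro n
  induction n with
  | zero =>
    intro l hl _
    have : l = [] := by cases l <;> simp_all
    subst this
    simp [genScan_nil]
  | succ n ih =>
    intro l hl hbad
    cases l with
    | nil => simp [genScan_nil]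
    | cons c t =>
      have hbadsub : ∀ m (y : List Char), y <:+ (c :: t) →
          ∀ p ∈ ps, ¬ (k.dropLast ++ p.1) <:+: y.drop m := by
        intro m y hy p hp hinf
        exact hbad p hp (hinf.trans ((List.drop_suffix m y).trans hy).isInfix)
      cases hfind : ps.find? (fun p => p.1.isPrefixOf (c :: t)) with
      | some p =>
        have hpmem := List.mem_of_find?_eq_some hfind
        obtain ⟨vt, hvt, hvtne, hvhd, hvnodollar⟩ := hpsv p hpmem
        -- LHS inner
        rw [genScan_cons_some _ _ _ _ hfind (hpsnil p hpmem)]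
        -- value barrier for the new key
        have hbarrier : genScan [(k, v)] (p.2 ++ genScan ps ((c :: t).drop p.1.length)) =
            p.2 ++ genScan [(k, v)] (genScan ps ((c :: t).drop p.1.length)) := by
          apply genScan_barrier
          intro j hj q hq hqpre
          simp only [List.mem_singleton] at hq
          subst hq
          rcases Nat.eq_zero_or_pos j with rfl | hjpos
          · -- j = 0 : second char of value is not k2
            rw [hvt] at hqpre
            simp only [List.drop_zero] at hqpre
            rw [hk] at hqpre
            obtain ⟨t', ht'⟩ := hqpre
            cases vt with
            | nil => exact hvtne rfl
            | cons b vt' =>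
              simp only [List.cons_append, List.cons.injEq] at ht'
              have : k2 = b := by
                have := ht'.2.1
                exact this ▸ rfl
              exact hvhd (by simp [this])
          · -- j ≥ 1 : value has no further '$'
            rw [hvt] at hj hqpre
            simp only [List.length_cons] at hj
            have hj1 : j - 1 < vt.length := by omega
            have hdropeq : ('$' :: vt).drop j = vt.drop (j - 1) := by
              cases j with
              | zero => omega
              | succ j' => simp
            rw [hdropeq, List.drop_eq_getElem_cons hj1, hk] at hqpre
            have := prefix_head hqpre
            simp only [List.cons_append, List.head?_cons, Option.some.injEq] at this
            exact hvnodollar _ (List.getElem_mem hj1) this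
        rw [hbarrier]
        -- IH on the dropped tail
        have hlen : ((c :: t).drop p.1.length).length ≤ n := by
          have := List.length_pos_iff.mpr (hpsnil p hpmem)
          simp only [List.length_drop, List.length_cons]
          simp only [List.length_cons] at hl
          omega
        rw [ih _ hlen (hbadsub p.1.length (c :: t) (List.suffix_refl _))]
        -- RHS
        have hfind' : (ps ++ [(k, v)]).find? (fun p => p.1.isPrefixOf (c :: t)) = some p := by
          rw [List.find?_append, hfind]; rfl
        rw [genScan_cons_some _ _ _ _ hfind' (hpsnil p hpmem)]
      | none =>
        by_cases hknew : k.isPrefixOf (c :: t)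
        · -- the new key matches at the head
          have hkpre : k <+: (c :: t) := List.isPrefixOf_iff_prefix.mp hknew
          obtain ⟨rest, hrest⟩ := hkpre
          -- barrier: the old scan copies k verbatim
          have hbarrier : genScan ps (k ++ rest) = k ++ genScan ps rest := by
            apply genScan_barrier
            intro j hj q hq hqpre
            obtain ⟨kt, hkt⟩ := hpsk q hq
            rcases Nat.eq_zero_or_pos j with rfl | hjpos
            · -- j = 0 : q would have matched
              simp only [List.drop_zero] at hqpre
              have := List.find?_eq_none.mp hfind q hq
              exact this (by rw [List.isPrefixOf_iff_prefix, ← hrest]; exact hqpre)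
            · rcases Nat.lt_or_ge j (k.length - 1) with hjlt | hjge
              · -- interior position: k has no '$' there
                rw [List.drop_eq_getElem_cons (by omega), hkt] at hqpre
                have := prefix_head hqpre
                simp only [List.cons_append, List.head?_cons, Option.some.injEq] at this
                have hlen1 : j - 1 < (k.dropLast.drop 1).length := by
                  simp only [List.length_drop, List.length_dropLast]
                  omega
                have hmem : k[j] ∈ k.dropLast.drop 1 := by
                  have h2 : (k.dropLast.drop 1)[j-1]'hlen1 = k[j]'hj := by
                    rw [List.getElem_drop, List.getElem_dropLast]
                    congr 1
                    omega
                  exact h2 ▸ List.getElem_mem hlen1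
                exact hkint _ hmem this
              · -- last position: the excluded overlap pattern
                have hjeq : j = k.length - 1 := by omega
                have hkspl : k.dropLast ++ ['$'] = k := by
                  have h1 := List.dropLast_concat_getLast hknil
                  have h2 : k.getLast hknil = '$' := by
                    have h3 := List.getLast?_eq_some_getLast hknil
                    rw [h3] at hklast
                    simpa using hklast
                  rw [h2] at h1
                  exact h1
                have hdrop : k.drop j = ['$'] := by
                  rw [hjeq]
                  conv_lhs => rw [← hkspl]
                  rw [List.drop_left' (by simp)]
                rw [hdrop] at hqpre
                -- q.1 <+: '$' :: rest, so k.dropLast ++ q.1 is an infix of l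
                have : (k.dropLast ++ q.1) <+: (k.dropLast ++ (['$'] ++ rest)) :=
                  (List.prefix_append_right_inj k.dropLast).mpr hqpre
                rw [← List.append_assoc, hkspl] at this
                exact hbad q hq (by rw [hrest] at this; exact this.isInfix)
          have hfind' : (ps ++ [(k, v)]).find? (fun p => p.1.isPrefixOf (c :: t)) = some (k, v) := by
            rw [List.find?_append, hfind]
            simp only [Option.none_or, List.find?_cons, hknew]
          rw [genScan_cons_some _ _ _ _ hfind' hknil]
          rw [← hrest, hbarrier, List.drop_left]
          -- new key fires on k ++ genScan ps rest
          have hcons : k ++ genScan ps rest = '$' :: (k2 :: ktail ++ genScan ps rest) := by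
            rw [hk]; simp
          have hfind2 : [(k, v)].find? (fun p => p.1.isPrefixOf ('$' :: (k2 :: ktail ++ genScan ps rest))) = some (k, v) := by
            simp only [List.find?_cons]
            have : k.isPrefixOf ('$' :: (k2 :: ktail ++ genScan ps rest)) = true := by
              rw [List.isPrefixOf_iff_prefix, ← hcons]
              exact List.prefix_append _ _
            rw [this]
          rw [hcons, genScan_cons_some _ _ _ _ hfind2 hknil, ← hcons, List.drop_left]
          -- IH on rest
          have hlsuffix : rest <:+ (c :: t) := ⟨k, hrest⟩
          have hlen : rest.length ≤ n := by
            have : (c :: t).length = k.length + rest.length := by rw [← hrest]; simp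
            simp only [List.length_cons] at this hl
            simp only [hk, List.length_cons] at this
            omega
          rw [ih rest hlen (by
            intro p hp hinf
            exact hbad p hp (hinf.trans hlsuffix.isInfix))]
        · -- no key matches at all
          rw [genScan_cons_none _ _ _ hfind]
          -- new key cannot match c :: genScan ps t
          have hnomatch : ¬ k.isPrefixOf (c :: genScan ps t) := by
            intro hmatch
            rw [List.isPrefixOf_iff_prefix, hk] at hmatch
            obtain ⟨t', ht'⟩ := hmatch
            simp only [List.cons_append, List.cons.injEq] at ht'
            obtain ⟨hc, hrest'⟩ := ht'
            have hwpre : (k2 :: ktail) <+: genScan ps t := ⟨t', hrest'⟩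
            have hwlast : (k2 :: ktail).getLast? = some '$' := by
              rw [hk] at hklast
              rwa [List.getLast?_cons_cons] at hklast
            have hwint : ∀ a ∈ (k2 :: ktail).dropLast, a ≠ '$' := by
              intro a ha
              apply hkint
              rw [hk]
              cases ktail with
              | nil => simp at ha
              | cons b bt =>
                rw [List.dropLast_cons₂, List.dropLast_cons₂] at *
                simpa using ha
            have hrefl := genScan_refl ps
              (fun p hp => (hpsv p hp).imp (fun vt h => h.1))
              hpsnil t.length t (k2 :: ktail) le_rfl (by simp) hwlast hwint hwpre
            rcases hrefl with h1 | ⟨p, hpmem, h2, h3⟩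
            · -- k would be a prefix of l
              apply hknew
              rw [List.isPrefixOf_iff_prefix, hk, ← hc]
              obtain ⟨t', rfl⟩ := h1
              exact ⟨t', by simp⟩
            · -- the excluded pattern occurs in l
              have hglue : ((k2 :: ktail).dropLast ++ p.1) <+: t := by
                apply prefix_glue h2
                have : (k2 :: ktail).dropLast.length = (k2 :: ktail).length - 1 := by simp
                rw [this]
                exact h3
              have hfull : (k.dropLast ++ p.1) <+: (c :: t) := by
                rw [hk, ← hc]
                have : ('$' :: k2 :: ktail).dropLast = '$' :: (k2 :: ktail).dropLast := by
                  rw [List.dropLast_cons₂]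
                rw [this]
                obtain ⟨t', ht'⟩ := hglue
                exact ⟨t', by simp [← ht']⟩
              exact hbad p hpmem hfull.isInfix
          have hfindB : [(k, v)].find? (fun p => p.1.isPrefixOf (c :: genScan ps t)) = none := by
            simp [hnomatch]
          rw [genScan_cons_none _ _ _ hfindB]
          -- IH on t
          rw [ih t (by simp at hl; omega) (by
            intro p hp hinf
            exact hbad p hp (hinf.trans (List.suffix_cons c t).isInfix))]
          -- RHS
          have hfind' : (ps ++ [(k, v)]).find? (fun p => p.1.isPrefixOf (c :: t)) = none := by
            rw [List.find?_append, hfind]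
            simp [hknew]
          rw [genScan_cons_none _ _ _ hfind']

theorem replace_go_eq (k v : List Char) (hk : k ≠ []) :
    ∀ (fuel : Nat) (l acc : List Char), l.length ≤ fuel →
    PySem.Chars.replace.go k v fuel l acc = acc.reverse ++ genScan [(k, v)] l := by
  intro fuel
  induction fuel with
  | zero =>
    intro l acc hl
    have : l = [] := by cases l <;> simp_all
    subst this
    simp [PySem.Chars.replace.go, genScan_nil]
  | succ fuel ih =>
    intro l acc hl
    cases l with
    | nil => simp [PySem.Chars.replace.go, genScan_nil]
    | cons c t =>
      rw [PySem.Chars.replace.go]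
      by_cases hpre : k.isPrefixOf (c :: t)
      · have hfind : [(k,v)].find? (fun p => p.1.isPrefixOf (c :: t)) = some (k,v) := by
          simp [List.find?, hpre]
        rw [if_pos hpre, genScan_cons_some _ _ _ _ hfind hk]
        have hlen : ((c :: t).drop k.length).length ≤ fuel := by
          have := List.length_pos_iff.mpr hk
          simp only [List.length_drop, List.length_cons]
          simp only [List.length_cons] at hl
          omega
        rw [ih _ _ hlen]
        simp
      · have hfind : [(k,v)].find? (fun p => p.1.isPrefixOf (c :: t)) = none := by
          simp [List.find?, hpre]
        rw [if_neg hpre, genScan_cons_none _ _ _ hfind]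
        rw [ih t (c :: acc) (by simp at hl ⊢; omega)]
        simp

theorem replace_eq_genScan (k v l : List Char) (hk : k ≠ []) :
    PySem.Chars.replace l k v = genScan [(k, v)] l := by
  rw [PySem.Chars.replace]
  rw [if_neg (by simpa using hk)]
  rw [replace_go_eq k v hk l.length l [] le_rfl]
  simp


theorem scanB_eq_genScan : ∀ (n : Nat) (l : List Char), l.length ≤ n → scanB l = genScan pvReps l := by
  intro n
  induction n with
  | zero =>
    intro l hl
    have : l = [] := by cases l <;> simp_all
    subst this
    simp [scanB, genScan_nil]
  | succ n ih =>
    intro l hl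
    cases l with
    | nil => simp [scanB, genScan_nil]
    | cons c t =>
      cases hfind : pvReps.find? (fun p => p.1.isPrefixOf (c :: t)) with
      | some p =>
        have hp1 : p.1 ≠ [] := by
          have := pvReps_key_pos _ (List.mem_of_find?_eq_some hfind)
          intro h
          rw [h] at this
          simp at this
        rw [scanB, hfind, genScan_cons_some _ _ _ _ hfind hp1]
        dsimp only
        congr 1
        apply ih
        have := pvReps_key_pos _ (List.mem_of_find?_eq_some hfind)
        simp only [List.length_drop, List.length_cons]
        simp only [List.length_cons] at hl
        omega
      | none =>
        rw [scanB, hfind, genScan_cons_none _ _ _ hfind]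
        dsimp only
        congr 1
        apply ih
        simp only [List.length_cons] at hl
        omega

-- ===== VERDICT (by name: the statement is the Claim_ definition above) =====
set_option maxRecDepth 4096 in
theorem expand_repo_macros_spec : Claim_equal_expand_repo_macros := by
  intro text _ hpre
  obtain ⟨hb21, hb31, hb32, hb41, hb42, hb43⟩ := hpre
  rw [eB21] at hb21
  rw [eB31] at hb31
  rw [eB32] at hb32
  rw [eB41] at hb41
  rw [eB42] at hb42
  rw [eB43] at hb43
  unfold Spec_expand_repo_macros expand_repo_macros expand_repo_macros_alt
  simp only [List.foldl]
  have key : ∀ (s : String) (l : List Char), s.toList = l → s = String.ofList l := by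
    intro s l h
    rw [← h, String.ofList_toList]
  apply key
  simp only [PySem.Str.toList_replace, eK1, eK2, eK3, eK4, eV1, eV3, eV4]
  rw [replace_eq_genScan _ _ _ (by decide), replace_eq_genScan _ _ _ (by decide),
      replace_eq_genScan _ _ _ (by decide), replace_eq_genScan _ _ _ (by decide)]
  rw [genScan_step [(cK1, cV1)] cK2 cV1 'P' (cK2.drop 2)
        (by rfl) (by decide) (by simp [cK2])
        (by intro p hp; fin_cases hp
            · exact ⟨cK1.drop 1, by rfl⟩)
        (by intro p hp; fin_cases hp
            · exact ⟨cV1.drop 1, by rfl, by simp [cV1], by simp [cV1], by simp [cV1]⟩)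
        text.toList.length _ le_rfl
        (by intro p hp; fin_cases hp
            · simpa using hb21)]
  simp only [List.cons_append, List.nil_append]
  rw [genScan_step [(cK1, cV1), (cK2, cV1)] cK3 cV3 'U' (cK3.drop 2)
        (by rfl) (by decide) (by simp [cK3])
        (by intro p hp; fin_cases hp
            · exact ⟨cK1.drop 1, by rfl⟩
            · exact ⟨cK2.drop 1, by rfl⟩)
        (by intro p hp; fin_cases hp
            · exact ⟨cV1.drop 1, by rfl, by simp [cV1], by simp [cV1], by simp [cV1]⟩
            · exact ⟨cV1.drop 1, by rfl, by simp [cV1], by simp [cV1], by simp [cV1]⟩)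
        text.toList.length _ le_rfl
        (by intro p hp; fin_cases hp
            · simpa using hb31
            · simpa using hb32)]
  simp only [List.cons_append, List.nil_append]
  rw [genScan_step [(cK1, cV1), (cK2, cV1), (cK3, cV3)] cK4 cV4 'M' (cK4.drop 2)
        (by rfl) (by decide) (by simp [cK4])
        (by intro p hp; fin_cases hp
            · exact ⟨cK1.drop 1, by rfl⟩
            · exact ⟨cK2.drop 1, by rfl⟩
            · exact ⟨cK3.drop 1, by rfl⟩)
        (by intro p hp; fin_cases hp
            · exact ⟨cV1.drop 1, by rfl, by simp [cV1], by simp [cV1], by simp [cV1]⟩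
            · exact ⟨cV1.drop 1, by rfl, by simp [cV1], by simp [cV1], by simp [cV1]⟩
            · exact ⟨cV3.drop 1, by rfl, by simp [cV3], by simp [cV3], by simp [cV3]⟩)
        text.toList.length _ le_rfl
        (by intro p hp; fin_cases hp
            · simpa using hb41
            · simpa using hb42
            · simpa using hb43)]
  simp only [List.cons_append, List.nil_append]
  rw [scanB_eq_genScan text.toList.length _ le_rfl, eReps]
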